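-- pv_equiv track=rewrite | github.com/StreyKenD/AIVT | kitsu-vtuber-ai/apps/policy_worker/main.py | _tokenize_for_streaming
-- ===== SOURCE A (Python) =====
-- from typing import Any, AsyncIterator, Dict, Iterable, List, Optional
--
-- def _tokenize_for_streaming(message: str) -> List[str]:
--     parts = message.split(" ")
--     tokens: List[str] = []
--     for index, chunk in enumerate(parts):
--         if not chunk:
--             continue
--         if index < len(parts) - 1:
--             tokens.append(f"{chunk} ")
--         else:
--             tokens.append(chunk)
--     return tokens
-- ===== SOURCE B (Python) =====
-- import re
--
-- def _tokenize_for_streaming(message: str):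
--     # Each token is a maximal run of non-space chars plus at most one following space.
--     return re.findall(r'[^ ]+ ?', message)
-- ===== Notes on version B (the rewrite author's own statement) =====
-- stated objective: idiomatic
-- what changed: Replaced the split-on-space list plus enumerate loop with last-index bookkeeping by a single re.findall of r'[^ ]+ ?', letting the regex engine emit each non-space run with its optional trailing space in one pass.
import Mathlib
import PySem

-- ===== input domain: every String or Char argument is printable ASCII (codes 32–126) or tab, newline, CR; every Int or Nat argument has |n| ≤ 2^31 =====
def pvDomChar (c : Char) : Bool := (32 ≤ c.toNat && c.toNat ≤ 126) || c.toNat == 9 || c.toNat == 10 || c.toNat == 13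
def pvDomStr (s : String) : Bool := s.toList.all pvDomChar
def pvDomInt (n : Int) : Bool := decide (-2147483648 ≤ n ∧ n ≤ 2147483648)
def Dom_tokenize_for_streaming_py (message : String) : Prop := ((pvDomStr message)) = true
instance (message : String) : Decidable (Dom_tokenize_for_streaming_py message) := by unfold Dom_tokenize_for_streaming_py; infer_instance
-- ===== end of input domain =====

-- B replaces A's split-on-space list plus enumerate loop by a single regex-style scan
-- (re.findall(r'[^ ]+ ?')) emitting each non-space run with its optional trailing space; objective: idiomatic.

-- ===== PORT A =====
def tokenize_for_streaming_py (message : String) : List String :=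
  let parts := (PySem.Chars.splitOn message.toList " ".toList).map String.ofList
  (PySem.List.enumerate parts).foldl
    (fun tokens iv =>
      if iv.2 = "" then tokens
      else if iv.1 < (parts.length : Int) - 1 then tokens ++ [iv.2 ++ " "]
      else tokens ++ [iv.2])
    []

-- ===== PORT B =====
-- Hand port of re.findall(r'[^ ]+ ?', message): a left-to-right scan; `acc` holds the
-- (reversed) chars of the current [^ ]+ run; on a space the match closes consuming that
-- one space; at end-of-string an open run closes without a space. Exact for this pattern.
def pvScanB : List Char → List Char → List String
  | acc, [] => if acc = [] then [] else [String.ofList acc.reverse]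
  | acc, c :: r =>
    if c = ' ' then
      if acc = [] then pvScanB [] r
      else String.ofList (acc.reverse ++ [' ']) :: pvScanB [] r
    else pvScanB (c :: acc) r

def tokenize_for_streaming_py_alt (message : String) : List String :=
  pvScanB [] message.toList

-- ===== PRECONDITION & SPEC =====
def Spec_tokenize_for_streaming_py (message : String) (out : List String) : Prop := out = tokenize_for_streaming_py_alt message
instance (message : String) (out : List String) : Decidable (Spec_tokenize_for_streaming_py message out) := by unfold Spec_tokenize_for_streaming_py; infer_instance

-- ===== CLAIM (what is proved, stated in full; the proofs are below) =====
def Claim_equal_tokenize_for_streaming_py : Prop := ∀ (message : String), Dom_tokenize_for_streaming_py message → Spec_tokenize_for_streaming_py message (tokenize_for_streaming_py message)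

-- ===== LEMMAS AND PROOFS =====

-- A simple recursive characterisation of splitting on a single space.
def pvSplit1 : List Char → List (List Char)
  | [] => [[]]
  | c :: r =>
    if c = ' ' then [] :: pvSplit1 r
    else match pvSplit1 r with
      | [] => [[c]]
      | p :: ps => (c :: p) :: ps

-- What A's loop computes on the parts list (last part gets no trailing space).
def pvTokS : List String → List String
  | [] => []
  | [p] => if p = "" then [] else [p]
  | p :: q :: r => (if p = "" then [] else [p ++ " "]) ++ pvTokS (q :: r)

theorem pvSplit1_ne_nil (l : List Char) : pvSplit1 l ≠ [] := by
  cases l with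
  | nil => simp [pvSplit1]
  | cons c r =>
    simp only [pvSplit1]
    split_ifs
    · simp
    · cases h : pvSplit1 r <;> simp

theorem pvGo_space (fuel : Nat) (rest cur : List Char) (acc : List (List Char)) :
    PySem.Chars.splitOn.go [' '] (fuel+1) (' ' :: rest) cur acc
      = PySem.Chars.splitOn.go [' '] fuel rest [] (cur.reverse :: acc) := by
  rw [PySem.Chars.splitOn.go]
  simp [List.isPrefixOf]

theorem pvGo_nonspace (fuel : Nat) (c : Char) (rest cur : List Char) (acc : List (List Char))
    (h : c ≠ ' ') :
    PySem.Chars.splitOn.go [' '] (fuel+1) (c :: rest) cur acc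
      = PySem.Chars.splitOn.go [' '] fuel rest (c :: cur) acc := by
  rw [PySem.Chars.splitOn.go]
  simp [List.isPrefixOf]
  intro hc; exact absurd hc.symm h

theorem pvGo_nil (fuel : Nat) (cur : List Char) (acc : List (List Char)) :
    PySem.Chars.splitOn.go [' '] (fuel+1) [] cur acc = (cur.reverse :: acc).reverse := by
  rw [PySem.Chars.splitOn.go]
  simp

theorem pvGo_eq_split1 (l : List Char) : ∀ (fuel : Nat) (cur : List Char) (acc : List (List Char)),
    l.length < fuel →
    PySem.Chars.splitOn.go [' '] fuel l cur acc
      = acc.reverse ++ (match pvSplit1 l with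
          | [] => []
          | p :: ps => (cur.reverse ++ p) :: ps) := by
  induction l with
  | nil =>
    intro fuel cur acc hf
    cases fuel with
    | zero => omega
    | succ f => rw [pvGo_nil]; simp [pvSplit1]
  | cons c r ih =>
    intro fuel cur acc hf
    cases fuel with
    | zero => simp at hf
    | succ f =>
      by_cases hc : c = ' '
      · subst hc
        rw [pvGo_space, ih f [] (cur.reverse :: acc) (by simpa using hf)]
        cases h : pvSplit1 r with
        | nil => exact absurd h (pvSplit1_ne_nil r)
        | cons p ps => simp [pvSplit1, h]
      · rw [pvGo_nonspace _ _ _ _ _ hc, ih f (c :: cur) acc (by simpa using hf)]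
        cases h : pvSplit1 r with
        | nil => exact absurd h (pvSplit1_ne_nil r)
        | cons p ps => simp [pvSplit1, hc, h]

theorem pvSplitOn_eq_split1 (l : List Char) :
    PySem.Chars.splitOn l [' '] = pvSplit1 l := by
  rw [PySem.Chars.splitOn]
  rw [pvGo_eq_split1 l (l.length + 1) [] [] (by omega)]
  cases h : pvSplit1 l with
  | nil => exact absurd h (pvSplit1_ne_nil l)
  | cons p ps => simp

-- A's enumerate-foldl, with the full length n fixed, equals pvTokS.
theorem pvFold_eq_tokS (n : Nat) (l : List String) :
    ∀ (i : Int) (acc : List String), i + l.length = n →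
    (PySem.List.enumerate l i).foldl
      (fun tokens iv =>
        if iv.2 = "" then tokens
        else if iv.1 < (n : Int) - 1 then tokens ++ [iv.2 ++ " "]
        else tokens ++ [iv.2]) acc
      = acc ++ pvTokS l := by
  induction l with
  | nil => intro i acc _; simp [PySem.List.enumerate, pvTokS]
  | cons p rest ih =>
    intro i acc hi
    rw [PySem.List.enumerate]
    simp only [List.foldl_cons]
    cases rest with
    | nil =>
      have hlt : ¬ (i < (n : Int) - 1) := by simp at hi; omega
      by_cases hp : p = "" <;>
        simp [hp, hlt, PySem.List.enumerate, pvTokS]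
    | cons q r =>
      have hlt : i < (n : Int) - 1 := by simp at hi; omega
      rw [show pvTokS (p :: q :: r) = (if p = "" then [] else [p ++ " "]) ++ pvTokS (q :: r) from rfl]
      by_cases hp : p = "" <;>
        simp only [hp, if_pos, if_neg, ite_false, hlt] <;>
        rw [ih (i + 1) _ (by simp at hi ⊢; omega)] <;> simp

-- B's scan equals pvTokS of the split parts.
theorem pvScanB_eq (l : List Char) : ∀ (acc : List Char) (p : List Char) (ps : List (List Char)),
    pvSplit1 l = p :: ps →
    pvScanB acc l = pvTokS (((acc.reverse ++ p) :: ps).map String.ofList) := by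
  induction l with
  | nil =>
    intro acc p ps h
    simp only [pvSplit1] at h
    cases h
    by_cases ha : acc = [] <;>
      simp [pvScanB, pvTokS, ha, String.ofList_eq_empty_iff]
  | cons c r ih =>
    intro acc p ps h
    by_cases hc : c = ' '
    · subst hc
      simp only [pvSplit1, if_pos] at h
      cases h
      cases hr : pvSplit1 r with
      | nil => exact absurd hr (pvSplit1_ne_nil r)
      | cons q qs =>
        have ihr := ih [] q qs hr
        simp only [List.reverse_nil, List.nil_append] at ihr
        by_cases ha : acc = []
        · simp [pvScanB, ha, pvTokS, ihr]
        · have hsp : String.ofList (acc.reverse ++ [' ']) = String.ofList acc.reverse ++ " " :=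
            String.ofList_append
          simp [pvScanB, ha, pvTokS, ihr, hsp, String.ofList_eq_empty_iff]
    · simp only [pvSplit1, if_neg hc] at h
      cases hr : pvSplit1 r with
      | nil => exact absurd hr (pvSplit1_ne_nil r)
      | cons q qs =>
        rw [hr] at h
        injection h with h1 h2
        subst h1; subst h2
        rw [show pvScanB acc (c :: r) = if c = ' ' then (if acc = [] then pvScanB [] r
              else String.ofList (acc.reverse ++ [' ']) :: pvScanB [] r)
            else pvScanB (c :: acc) r from rfl, if_neg hc]
        rw [ih (c :: acc) q qs hr]
        simp

-- ===== VERDICT (by name: the statement is the Claim_ definition above) =====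
theorem tokenize_for_streaming_py_spec : Claim_equal_tokenize_for_streaming_py := by
  intro message _
  unfold Spec_tokenize_for_streaming_py tokenize_for_streaming_py tokenize_for_streaming_py_alt
  show (PySem.List.enumerate ((PySem.Chars.splitOn message.toList " ".toList).map String.ofList)).foldl
      (fun tokens iv =>
        if iv.2 = "" then tokens
        else if iv.1 < ((((PySem.Chars.splitOn message.toList " ".toList).map String.ofList).length : Nat) : Int) - 1
          then tokens ++ [iv.2 ++ " "]
        else tokens ++ [iv.2]) []
    = pvScanB [] message.toList
  rw [show (" ".toList : List Char) = [' '] from rfl, pvSplitOn_eq_split1]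
  cases h : pvSplit1 message.toList with
  | nil => exact absurd h (pvSplit1_ne_nil message.toList)
  | cons p ps =>
    rw [pvFold_eq_tokS (((p :: ps).map String.ofList).length) ((p :: ps).map String.ofList) 0 [] (by simp),
      pvScanB_eq message.toList [] p ps h]
    simp
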